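-- pv_equiv track=rewrite | github.com/fpriore/match-scheduling | main.py | conta_breaks
-- ===== SOURCE A (Python) =====
-- def conta_breaks(campionato):
--     breaks = 0
--     squadre_rotture = []
--     rotture_per_squadre = []
--
--     for giornata_1,giornata_2 in zip(campionato,campionato[1:]): # compara il campionato due giornate alla volta
--         for match_1 in giornata_1:
--             for match_2 in giornata_2:
--                 if match_1[0] == match_2[0]:
--                     breaks += 1
--                     squadre_rotture.append(match_1[0])
--                 if match_1[1] == match_2[1]:
--                     squadre_rotture.append(match_1[1])
--                     breaks += 1
--
--     for sr in squadre_rotture: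
--         cnt = squadre_rotture.count(sr)
--         if [sr,cnt] not in rotture_per_squadre:
--             rotture_per_squadre.append([sr,cnt])
--     rotture_per_squadre.sort(key=lambda tup: tup[1], reverse=True)
--
--     return breaks, rotture_per_squadre
-- ===== SOURCE B (Python) =====
-- # B: count each next round's home/away teams in dicts once, credit breaks per team in a
-- # single insertion-ordered tally dict, and sort its items at the end (no quadratic scans).
-- def conta_breaks(campionato):
--     breaks = 0
--     tally = {}
--     for g1, g2 in zip(campionato, campionato[1:]):
--         homes = {}
--         aways = {}
--         for m in g2:
--             homes[m[0]] = homes.get(m[0], 0) + 1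
--             aways[m[1]] = aways.get(m[1], 0) + 1
--         for m in g1:
--             h = homes.get(m[0], 0)
--             if h:
--                 breaks += h
--                 tally[m[0]] = tally.get(m[0], 0) + h
--             a = aways.get(m[1], 0)
--             if a:
--                 breaks += a
--                 tally[m[1]] = tally.get(m[1], 0) + a
--     result = [[t, c] for t, c in tally.items()]
--     result.sort(key=lambda p: p[1], reverse=True)
--     return breaks, result
-- ===== Notes on version B (the rewrite author's own statement) =====
-- stated objective: faster
-- what changed: Instead of comparing every match of a round with every match of the next and deduplicating with quadratic count/membership scans, B counts each next round's home and away teams in dicts once and accumulates the per-team break tally in one insertion-ordered dict, sorting its items at the end; …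
-- outside the precondition, e.g. on conta_breaks([[], [[1]]]): A returns (0, []), B raises IndexError; on conta_breaks([[[1, 2]], [[3, 2], [1, 4]]]): A returns (2, [[2, 1], [1, 1]]), B returns (2, [[1, 1], [2, 1]])
import Mathlib
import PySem

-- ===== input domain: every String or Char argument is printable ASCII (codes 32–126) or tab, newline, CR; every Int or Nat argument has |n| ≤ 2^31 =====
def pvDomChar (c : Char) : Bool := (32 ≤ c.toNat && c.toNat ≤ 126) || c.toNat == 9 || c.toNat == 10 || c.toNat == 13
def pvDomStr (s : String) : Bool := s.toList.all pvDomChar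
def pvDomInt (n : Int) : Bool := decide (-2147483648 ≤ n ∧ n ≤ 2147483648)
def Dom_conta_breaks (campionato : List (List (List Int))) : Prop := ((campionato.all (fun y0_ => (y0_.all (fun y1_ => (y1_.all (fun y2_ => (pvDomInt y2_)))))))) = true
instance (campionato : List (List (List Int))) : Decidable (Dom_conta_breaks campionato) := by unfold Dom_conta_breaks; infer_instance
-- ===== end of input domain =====

-- B replaces A's cross-product scan of consecutive rounds and its quadratic count/membership dedup by per-round home/away count dicts and one insertion-ordered tally dict (faster).

-- ===== PORT A =====
-- m[i] with Python indexing; the default 0 is only reachable outside Pre_conta_breaks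
def pyIdx (m : List Int) (i : Int) : Int := (PySem.List.pyGet? m i).getD 0

-- the body of A's innermost loop (the two ifs)
def stepA (m1 : List Int) (st : Int × List Int) (m2 : List Int) : Int × List Int :=
  let st1 := if pyIdx m1 0 = pyIdx m2 0 then (st.1 + 1, st.2 ++ [pyIdx m1 0]) else st
  if pyIdx m1 1 = pyIdx m2 1 then (st1.1 + 1, st1.2 ++ [pyIdx m1 1]) else st1

-- A's two inner 'for' loops over one pair of consecutive rounds
def loopA (st : Int × List Int) (g : List (List Int) × List (List Int)) : Int × List Int :=
  g.1.foldl (fun st m1 => g.2.foldl (stepA m1) st) st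

def conta_breaks (campionato : List (List (List Int))) : Int × List (List Int) :=
  -- zip(campionato, campionato[1:]); campionato[1:] is List.drop 1 (exact)
  let pairs := campionato.zip (campionato.drop 1)
  let bs := pairs.foldl loopA (0, [])
  -- second loop: cnt = squadre_rotture.count(sr); if [sr,cnt] not in rotture: append
  let rotture := bs.2.foldl (fun acc sr =>
      let cnt : Int := (bs.2.count sr : Int)
      if acc.contains [sr, cnt] then acc else acc ++ [[sr, cnt]]) ([] : List (List Int))
  (bs.1, PySem.List.sorted rotture (fun t => pyIdx t 1) true)

-- ===== PORT B =====
-- the 'for m in g2' loop building the homes and aways count dicts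
def bIndexes (g : List (List Int)) : PySem.Dict Int Int × PySem.Dict Int Int :=
  g.foldl (fun d m =>
      (d.1.insert (pyIdx m 0) (d.1.getD (pyIdx m 0) 0 + 1),
       d.2.insert (pyIdx m 1) (d.2.getD (pyIdx m 1) 0 + 1)))
    (PySem.Dict.empty, PySem.Dict.empty)

-- tally[t] = tally.get(t, 0) + c
def bCredit (tally : PySem.Dict Int Int) (t c : Int) : PySem.Dict Int Int :=
  tally.insert t (tally.getD t 0 + c)

-- the body of B's 'for m in g1' loop
def bStepM (homes aways : PySem.Dict Int Int) (st : Int × PySem.Dict Int Int)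
    (m1 : List Int) : Int × PySem.Dict Int Int :=
  let h := homes.getD (pyIdx m1 0) 0
  let st1 := if h ≠ 0 then (st.1 + h, bCredit st.2 (pyIdx m1 0) h) else st
  let a := aways.getD (pyIdx m1 1) 0
  if a ≠ 0 then (st1.1 + a, bCredit st1.2 (pyIdx m1 1) a) else st1

-- B's loop body for one pair of consecutive rounds
def loopB (st : Int × PySem.Dict Int Int) (g : List (List Int) × List (List Int)) :
    Int × PySem.Dict Int Int :=
  let hd := bIndexes g.2
  g.1.foldl (bStepM hd.1 hd.2) st

def conta_breaks_alt (campionato : List (List (List Int))) : Int × List (List Int) :=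
  let pairs := campionato.zip (campionato.drop 1)
  let bt := pairs.foldl loopB (0, PySem.Dict.empty)
  let res := bt.2.items.map (fun p => [p.1, p.2])
  (bt.1, PySem.List.sorted res (fun t => pyIdx t 1) true)

-- ===== PRECONDITION & SPEC =====
-- helpers for Pre_ only (plain list inspections; they do not touch the ports)
def mGet (m : List Int) (i : Nat) : Int := m.getD i 0
def preCnt (g : List (List Int)) (i : Nat) (t : Int) : Nat := g.countP (fun m => mGet m i == t)
def preIdx (g : List (List Int)) (i : Nat) (t : Int) : Nat := g.findIdx (fun m => mGet m i == t)

-- Pre_ excludes (a) inputs having a match with fewer than two entries — A raises IndexError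
-- whenever its loops reach such a match, and B, which indexes every match of every paired
-- round, raises even where A's loops happen to skip it — and (b) inputs where some match's
-- away break first occurs at an earlier position of the next round than its home break:
-- there A's tally insertion order, hence the tie order among equal counts in the stably
-- sorted result, is an accident of A's scan order (B always credits home before away).
def Pre_conta_breaks (campionato : List (List (List Int))) : Prop :=
  (campionato.length ≤ 1 ∨ ∀ g ∈ campionato, ∀ m ∈ g, 2 ≤ m.length) ∧
  ∀ p ∈ campionato.zip (campionato.drop 1), ∀ m1 ∈ p.1,
    preCnt p.2 0 (mGet m1 0) ≠ 0 → preCnt p.2 1 (mGet m1 1) ≠ 0 →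
    preIdx p.2 0 (mGet m1 0) ≤ preIdx p.2 1 (mGet m1 1)
instance (campionato : List (List (List Int))) : Decidable (Pre_conta_breaks campionato) := by
  unfold Pre_conta_breaks; infer_instance

def pvWitness_conta_breaks : List (List (List Int)) :=
  [[[1, 2], [3, 4]], [[1, 2], [3, 4]]]

def Spec_conta_breaks (campionato : List (List (List Int))) (out : Int × List (List Int)) : Prop := out = conta_breaks_alt campionato
instance (campionato : List (List (List Int))) (out : Int × List (List Int)) : Decidable (Spec_conta_breaks campionato out) := by unfold Spec_conta_breaks; infer_instance

-- ===== CLAIM (what is proved, stated in full; the proofs are below) =====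
def Claim_equal_conta_breaks : Prop := ∀ (campionato : List (List (List Int))), Dom_conta_breaks campionato → Pre_conta_breaks campionato → Spec_conta_breaks campionato (conta_breaks campionato)

-- ===== LEMMAS AND PROOFS =====

-- the multiset/list of teams A appends for one (m1, m2) comparison
def segM (m1 m2 : List Int) : List Int :=
  (if pyIdx m1 0 = pyIdx m2 0 then [pyIdx m1 0] else []) ++
  (if pyIdx m1 1 = pyIdx m2 1 then [pyIdx m1 1] else [])

def seg1 (m1 : List Int) (g2 : List (List Int)) : List Int := g2.flatMap (segM m1)

def segG (g : List (List Int) × List (List Int)) : List Int :=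
  g.1.flatMap (fun m1 => seg1 m1 g.2)

def SQ (campionato : List (List (List Int))) : List Int :=
  (campionato.zip (campionato.drop 1)).flatMap segG

-- counter insertion step ('tally[t] = tally.get(t,0)+1')
def ins (d : PySem.Dict Int Int) (t : Int) : PySem.Dict Int Int := d.insert t (d.getD t 0 + 1)

def cfold (st : Int × PySem.Dict Int Int) (l : List Int) : Int × PySem.Dict Int Int :=
  l.foldl (fun st t => (st.1 + 1, ins st.2 t)) st

def cntP (g : List (List Int)) (pos : Int) (t : Int) : Nat :=
  g.countP (fun m => pyIdx m pos == t)

def fidx (g : List (List Int)) (pos : Int) (t : Int) : Nat :=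
  g.findIdx (fun m => pyIdx m pos == t)

lemma stepA_eq (m1 m2 : List Int) (st : Int × List Int) :
    stepA m1 st m2 = (st.1 + ((segM m1 m2).length : Int), st.2 ++ segM m1 m2) := by
  unfold stepA segM
  split_ifs with h1 h2 h2
  all_goals simp
  all_goals omega

lemma foldl_lenapp {α : Type} (f : α → List Int) (l : List α) (b : Int) (s : List Int) :
    l.foldl (fun st x => (st.1 + ((f x).length : Int), st.2 ++ f x)) (b, s)
      = (b + ((l.flatMap f).length : Int), s ++ l.flatMap f) := by
  induction l generalizing b s with
  | nil => simp
  | cons x xs ih =>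
      simp [ih, List.flatMap_cons]
      ring

lemma loopA_eq (st : Int × List Int) (g : List (List Int) × List (List Int)) :
    loopA st g = (st.1 + ((segG g).length : Int), st.2 ++ segG g) := by
  unfold loopA segG
  have h1 : ∀ (st : Int × List Int) (m1 : List Int),
      g.2.foldl (stepA m1) st = (st.1 + ((seg1 m1 g.2).length : Int), st.2 ++ seg1 m1 g.2) := by
    intro st m1
    have := PySem.List.foldl_congr_mem (l := g.2) (init := st)
      (f := stepA m1) (g := fun st m2 => (st.1 + ((segM m1 m2).length : Int), st.2 ++ segM m1 m2))
      (by intro acc x _; exact stepA_eq m1 x acc)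
    rw [this]
    obtain ⟨b, s⟩ := st
    exact foldl_lenapp (segM m1) g.2 b s
  have h2 := PySem.List.foldl_congr_mem (l := g.1) (init := st)
    (f := fun st m1 => g.2.foldl (stepA m1) st)
    (g := fun st m1 => (st.1 + ((seg1 m1 g.2).length : Int), st.2 ++ seg1 m1 g.2))
    (by intro acc x _; exact h1 acc x)
  rw [h2]
  obtain ⟨b, s⟩ := st
  exact foldl_lenapp (fun m1 => seg1 m1 g.2) g.1 b s

lemma A_phase1 (campionato : List (List (List Int))) :
    (campionato.zip (campionato.drop 1)).foldl loopA (0, [])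
      = (((SQ campionato).length : Int), SQ campionato) := by
  unfold SQ
  have h2 := PySem.List.foldl_congr_mem (l := campionato.zip (campionato.drop 1))
    (init := ((0 : Int), ([] : List Int))) (f := loopA)
    (g := fun st g => (st.1 + ((segG g).length : Int), st.2 ++ segG g))
    (by intro acc x _; exact loopA_eq acc x)
  rw [h2]
  have := foldl_lenapp segG (campionato.zip (campionato.drop 1)) 0 []
  simpa using this

lemma not_mem_keys_of_contains_false (d : PySem.Dict Int Int) (k : Int)
    (h : d.contains k = false) : ∀ p ∈ d.items, p.1 ≠ k := by
  intro p hp hk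
  have hm : k ∈ d.keys := by
    have := PySem.Dict.mem_keys_of_mem_items d hp
    rwa [hk] at this
  rw [← PySem.Dict.contains_iff_mem_keys] at hm
  simp [h] at hm

def updP (k v : Int) (p : Int × Int) : Int × Int := if p.1 == k then (k, v) else p

lemma map_upd_fresh (d : PySem.Dict Int Int) (k v : Int) (h : d.contains k = false) :
    d.items.map (updP k v) = d.items := by
  have hid : ∀ p ∈ d.items, updP k v p = p := by
    intro p hp
    simp [updP, show (p.1 == k) = false by
      simpa using not_mem_keys_of_contains_false d k h p hp]
  rw [List.map_congr_left hid]
  simp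

lemma insert_comm_collapse (d : PySem.Dict Int Int) (h a : Int) (hne : a ≠ h) (v1 v2 v3 : Int) :
    ((d.insert h v1).insert a v2).insert h v3 = (d.insert h v3).insert a v2 := by
  apply PySem.Dict.ext
  have hca : ((d.insert h v1)).contains a = d.contains a := by
    rw [PySem.Dict.contains_insert]; simp [hne]
  have hch : ((d.insert h v1).insert a v2).contains h = true := by
    rw [PySem.Dict.contains_insert]; simp [PySem.Dict.contains_insert_self]
  have hca2 : (d.insert h v3).contains a = d.contains a := by
    rw [PySem.Dict.contains_insert]; simp [hne]
  rw [PySem.Dict.items_insert_of_contains _ _ hch]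
  cases hh : d.contains h <;> cases ha : d.contains a
  · -- h fresh, a fresh
    rw [PySem.Dict.items_insert_of_not_contains _ _ (hca.trans ha),
        PySem.Dict.items_insert_of_not_contains _ _ hh,
        PySem.Dict.items_insert_of_not_contains _ _ (hca2.trans ha),
        PySem.Dict.items_insert_of_not_contains _ _ hh]
    show List.map (updP h v3) _ = _
    rw [List.append_assoc, List.map_append, map_upd_fresh d h v3 hh]
    simp [updP, hne]
  · -- h fresh, a present
    rw [PySem.Dict.items_insert_of_contains _ _ (hca.trans ha),
        PySem.Dict.items_insert_of_not_contains _ _ hh,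
        PySem.Dict.items_insert_of_contains _ _ (hca2.trans ha),
        PySem.Dict.items_insert_of_not_contains _ _ hh]
    show List.map (updP h v3) (List.map (updP a v2) _) = List.map (updP a v2) _
    rw [List.map_append, List.map_append, List.map_map, List.map_append]
    have : List.map (updP h v3 ∘ updP a v2) d.items = List.map (updP a v2) d.items := by
      apply List.map_congr_left
      intro p hp
      have hpne : p.1 ≠ h := not_mem_keys_of_contains_false d h hh p hp
      by_cases hpa : p.1 = a <;> simp [updP, hpa, hpne, hne]
    rw [this]
    simp [updP, Ne.symm hne]
  · -- h present, a fresh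
    rw [PySem.Dict.items_insert_of_not_contains _ _ (hca.trans ha),
        PySem.Dict.items_insert_of_contains _ _ hh,
        PySem.Dict.items_insert_of_not_contains _ _ (hca2.trans ha),
        PySem.Dict.items_insert_of_contains _ _ hh]
    show List.map (updP h v3) (List.map (updP h v1) _ ++ _) = List.map (updP h v3) _ ++ _
    rw [List.map_append, List.map_map]
    have : List.map (updP h v3 ∘ updP h v1) d.items = List.map (updP h v3) d.items := by
      apply List.map_congr_left
      intro p _
      by_cases hph : p.1 = h <;> simp [updP, hph]
    rw [this]
    simp [updP, hne]
  · -- both present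
    rw [PySem.Dict.items_insert_of_contains _ _ (hca.trans ha),
        PySem.Dict.items_insert_of_contains _ _ hh,
        PySem.Dict.items_insert_of_contains _ _ (hca2.trans ha),
        PySem.Dict.items_insert_of_contains _ _ hh]
    show List.map (updP h v3) (List.map (updP a v2) (List.map (updP h v1) _)) = List.map (updP a v2) (List.map (updP h v3) _)
    rw [List.map_map, List.map_map, List.map_map]
    apply List.map_congr_left
    intro p _
    by_cases hph : p.1 = h <;> by_cases hpa : p.1 = a <;> simp [updP, hph, hpa, hne] <;> simp_all

lemma credit_credit_same (d : PySem.Dict Int Int) (t x y : Int) :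
    bCredit (bCredit d t x) t y = bCredit d t (x + y) := by
  unfold bCredit
  rw [PySem.Dict.getD_insert_self, PySem.Dict.insert_insert_self, add_assoc]

lemma credit_swap (d : PySem.Dict Int Int) (h a x y z : Int) (hne : h ≠ a) :
    bCredit (bCredit (bCredit d h x) a y) h z = bCredit (bCredit d h (x + z)) a y := by
  unfold bCredit
  simp [PySem.Dict.getD_insert, hne, Ne.symm hne, add_assoc]
  rw [insert_comm_collapse d h a (Ne.symm hne)]

lemma ins_eq_credit (d : PySem.Dict Int Int) (t : Int) : ins d t = bCredit d t 1 := rfl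

lemma fold_ins_one (l : List Int) (h : Int) (d : PySem.Dict Int Int)
    (hl : ∀ x ∈ l, x = h) (hne : l ≠ []) :
    l.foldl ins d = bCredit d h (l.length : Int) := by
  induction l generalizing d with
  | nil => simp at hne
  | cons x rest ih =>
    obtain rfl : x = h := hl x (List.mem_cons_self)
    by_cases hr : rest = []
    · subst hr; simp [ins_eq_credit]
    · rw [List.foldl_cons, ins_eq_credit,
        ih (bCredit d x 1) (fun y hy => hl y (List.mem_cons_of_mem _ hy)) hr,
        credit_credit_same, List.length_cons]
      congr 1
      push_cast
      ring

lemma cast_succ_int (n : Nat) : ((n + 1 : Nat) : Int) = 1 + (n : Int) := by push_cast; ring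

lemma fold_ins_two (l : List Int) (h a : Int) (d : PySem.Dict Int Int) (hne : h ≠ a)
    (hl : ∀ x ∈ l, x = h ∨ x = a) :
    l.foldl ins d =
      if l.count h = 0 then
        (if l.count a = 0 then d else bCredit d a (l.count a : Int))
      else if l.count a = 0 then bCredit d h (l.count h : Int)
      else if l.findIdx (· == h) < l.findIdx (· == a) then
        bCredit (bCredit d h (l.count h : Int)) a (l.count a : Int)
      else
        bCredit (bCredit d a (l.count a : Int)) h (l.count h : Int) := by
  induction l generalizing d with
  | nil => simp
  | cons x rest ih =>
    have hlr : ∀ y ∈ rest, y = h ∨ y = a := fun y hy => hl y (List.mem_cons_of_mem _ hy)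
    rw [List.foldl_cons, ih (ins d x) hlr, ins_eq_credit]
    rcases hl x (List.mem_cons_self) with rfl | rfl
    · -- x = h
      have hxa : (x == a) = false := by simp [hne]
      have hax : (a == x) = false := by simp [Ne.symm hne]
      have c1 : (x :: rest).count x = rest.count x + 1 := by simp
      have c2 : (x :: rest).count a = rest.count a := by
        simp [hne]
      have f1 : (x :: rest).findIdx (· == x) = 0 := by simp [List.findIdx_cons]
      have f2 : (x :: rest).findIdx (· == a) = rest.findIdx (· == a) + 1 := by
        simp [List.findIdx_cons, hxa]
      rw [c1, c2, f1, f2]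
      by_cases hch : rest.count x = 0 <;> by_cases hca : rest.count a = 0
      · rw [if_pos hch, if_pos hca,
          if_neg (show ¬(rest.count x + 1 = 0) from by omega), if_pos hca, hch]
        norm_num
      · rw [if_pos hch, if_neg hca,
          if_neg (show ¬(rest.count x + 1 = 0) from by omega), if_neg hca,
          if_pos (show (0 : Nat) < rest.findIdx (· == a) + 1 from by omega), hch]
        norm_num
      · rw [if_neg hch, if_pos hca,
          if_neg (show ¬(rest.count x + 1 = 0) from by omega), if_pos hca,
          credit_credit_same, cast_succ_int]
      · rw [if_neg hch, if_neg hca,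
          if_neg (show ¬(rest.count x + 1 = 0) from by omega), if_neg hca,
          if_pos (show (0 : Nat) < rest.findIdx (· == a) + 1 from by omega), cast_succ_int]
        split_ifs with ho
        · rw [credit_credit_same]
        · rw [credit_swap _ _ _ _ _ _ hne]
    · -- x = a
      have hxh : (x == h) = false := by simp [Ne.symm hne]
      have hhx : (h == x) = false := by simp [hne]
      have c1 : (x :: rest).count x = rest.count x + 1 := by simp
      have c2 : (x :: rest).count h = rest.count h := by
        simp [Ne.symm hne]
      have f1 : (x :: rest).findIdx (· == x) = 0 := by simp [List.findIdx_cons]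
      have f2 : (x :: rest).findIdx (· == h) = rest.findIdx (· == h) + 1 := by
        simp [List.findIdx_cons, hxh]
      rw [c1, c2, f1, f2]
      by_cases hch : rest.count h = 0 <;> by_cases hca : rest.count x = 0
      · rw [if_pos hch, if_pos hca, if_pos hch,
          if_neg (show ¬(rest.count x + 1 = 0) from by omega), hca]
        norm_num
      · rw [if_pos hch, if_neg hca, if_pos hch,
          if_neg (show ¬(rest.count x + 1 = 0) from by omega),
          credit_credit_same, cast_succ_int]
      · rw [if_neg hch, if_pos hca, if_neg hch,
          if_neg (show ¬(rest.count x + 1 = 0) from by omega),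
          if_neg (show ¬(rest.findIdx (· == h) + 1 < 0) from by omega), hca]
        norm_num
      · rw [if_neg hch, if_neg hca, if_neg hch,
          if_neg (show ¬(rest.count x + 1 = 0) from by omega),
          if_neg (show ¬(rest.findIdx (· == h) + 1 < 0) from by omega), cast_succ_int]
        split_ifs with ho
        · rw [credit_swap _ _ _ _ _ _ (Ne.symm hne)]
        · rw [credit_credit_same]

-- the joint homes/aways fold is two counters
lemma bIndexes_eq (g : List (List Int)) :
    bIndexes g = (PySem.Dict.counter (g.map (fun m => pyIdx m 0)),
                  PySem.Dict.counter (g.map (fun m => pyIdx m 1))) := by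
  unfold bIndexes
  rw [PySem.List.foldl_prod_mk
      (f := fun d (m : List Int) => PySem.Dict.insert d (pyIdx m 0) (d.getD (pyIdx m 0) 0 + 1))
      (g := fun d (m : List Int) => PySem.Dict.insert d (pyIdx m 1) (d.getD (pyIdx m 1) 0 + 1))]
  rw [← List.foldl_map (f := fun m => pyIdx m 0)
      (g := fun d t => PySem.Dict.insert d t (d.getD t 0 + 1)),
    ← List.foldl_map (f := fun m => pyIdx m 1)
      (g := fun d t => PySem.Dict.insert d t (d.getD t 0 + 1)),
    PySem.Dict.foldl_insert_getD_add_one_eq_counter,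
    PySem.Dict.foldl_insert_getD_add_one_eq_counter]

lemma getD_bIndexes_fst (g : List (List Int)) (t : Int) :
    (bIndexes g).1.getD t 0 = (cntP g 0 t : Int) := by
  rw [bIndexes_eq]
  show (PySem.Dict.counter (g.map (fun m => pyIdx m 0))).getD t 0 = _
  rw [PySem.Dict.getD_counter]
  unfold cntP
  rw [List.count_eq_countP, List.countP_map]
  rfl

lemma getD_bIndexes_snd (g : List (List Int)) (t : Int) :
    (bIndexes g).2.getD t 0 = (cntP g 1 t : Int) := by
  rw [bIndexes_eq]
  show (PySem.Dict.counter (g.map (fun m => pyIdx m 1))).getD t 0 = _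
  rw [PySem.Dict.getD_counter]
  unfold cntP
  rw [List.count_eq_countP, List.countP_map]
  rfl

lemma mem_seg1 (m1 : List Int) (g2 : List (List Int)) (x : Int) (hx : x ∈ seg1 m1 g2) :
    x = pyIdx m1 0 ∨ x = pyIdx m1 1 := by
  rw [seg1, List.mem_flatMap] at hx
  obtain ⟨m2, _, hx⟩ := hx
  rw [segM, List.mem_append] at hx
  rcases hx with hx | hx <;> split_ifs at hx <;> simp_all

lemma count_seg1_home (m1 : List Int) (g2 : List (List Int))
    (hne : pyIdx m1 0 ≠ pyIdx m1 1) :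
    (seg1 m1 g2).count (pyIdx m1 0) = cntP g2 0 (pyIdx m1 0) := by
  induction g2 with
  | nil => simp [seg1, cntP]
  | cons m2 rest ih =>
    rw [seg1, List.flatMap_cons, List.count_append, ← seg1, ih]
    simp only [cntP, List.countP_cons]
    rw [segM, List.count_append]
    have eaH : (pyIdx m1 1 == pyIdx m1 0) = false := by simp [Ne.symm hne]
    by_cases h1 : pyIdx m1 0 = pyIdx m2 0 <;> by_cases h2 : pyIdx m1 1 = pyIdx m2 1
    · rw [if_pos h1, if_pos h2]
      simp [List.count_cons, eaH, ← h1]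
      omega
    · rw [if_pos h1, if_neg h2]
      simp [← h1]
      omega
    · rw [if_neg h1, if_pos h2]
      have b1 : (pyIdx m2 0 == pyIdx m1 0) = false := by
        simp only [beq_eq_false_iff_ne, ne_eq]
        exact fun e => h1 e.symm
      simp [List.count_cons, eaH, b1]
    · rw [if_neg h1, if_neg h2]
      have b1 : (pyIdx m2 0 == pyIdx m1 0) = false := by
        simp only [beq_eq_false_iff_ne, ne_eq]
        exact fun e => h1 e.symm
      simp [b1]

lemma count_seg1_away (m1 : List Int) (g2 : List (List Int))
    (hne : pyIdx m1 0 ≠ pyIdx m1 1) :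
    (seg1 m1 g2).count (pyIdx m1 1) = cntP g2 1 (pyIdx m1 1) := by
  induction g2 with
  | nil => simp [seg1, cntP]
  | cons m2 rest ih =>
    rw [seg1, List.flatMap_cons, List.count_append, ← seg1, ih]
    simp only [cntP, List.countP_cons]
    rw [segM, List.count_append]
    have ehA : (pyIdx m1 0 == pyIdx m1 1) = false := by simp [hne]
    by_cases h1 : pyIdx m1 0 = pyIdx m2 0 <;> by_cases h2 : pyIdx m1 1 = pyIdx m2 1
    · rw [if_pos h1, if_pos h2]
      simp [List.count_cons, ehA, ← h2]
      omega
    · rw [if_pos h1, if_neg h2]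
      have b2 : (pyIdx m2 1 == pyIdx m1 1) = false := by
        simp only [beq_eq_false_iff_ne, ne_eq]
        exact fun e => h2 e.symm
      simp [List.count_cons, ehA, b2]
    · rw [if_neg h1, if_pos h2]
      simp [← h2]
      omega
    · rw [if_neg h1, if_neg h2]
      have b2 : (pyIdx m2 1 == pyIdx m1 1) = false := by
        simp only [beq_eq_false_iff_ne, ne_eq]
        exact fun e => h2 e.symm
      simp [b2]

lemma length_seg1 (m1 : List Int) (g2 : List (List Int)) :
    (seg1 m1 g2).length = cntP g2 0 (pyIdx m1 0) + cntP g2 1 (pyIdx m1 1) := by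
  induction g2 with
  | nil => simp [seg1, cntP]
  | cons m2 rest ih =>
    rw [seg1, List.flatMap_cons, List.length_append, ← seg1, ih, segM]
    simp only [cntP, List.countP_cons]
    by_cases h1 : pyIdx m1 0 = pyIdx m2 0 <;> by_cases h2 : pyIdx m1 1 = pyIdx m2 1
    · rw [if_pos h1, if_pos h2]
      simp [← h1, ← h2]
      omega
    · rw [if_pos h1, if_neg h2]
      have b2 : (pyIdx m2 1 == pyIdx m1 1) = false := by
        simp only [beq_eq_false_iff_ne, ne_eq]
        exact fun e => h2 e.symm
      simp [← h1, b2]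
      omega
    · rw [if_neg h1, if_pos h2]
      have b1 : (pyIdx m2 0 == pyIdx m1 0) = false := by
        simp only [beq_eq_false_iff_ne, ne_eq]
        exact fun e => h1 e.symm
      simp [b1, ← h2]
      omega
    · rw [if_neg h1, if_neg h2]
      have b1 : (pyIdx m2 0 == pyIdx m1 0) = false := by
        simp only [beq_eq_false_iff_ne, ne_eq]
        exact fun e => h1 e.symm
      have b2 : (pyIdx m2 1 == pyIdx m1 1) = false := by
        simp only [beq_eq_false_iff_ne, ne_eq]
        exact fun e => h2 e.symm
      simp [b1, b2]

lemma first_seg1 (m1 : List Int) (g2 : List (List Int))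
    (hne : pyIdx m1 0 ≠ pyIdx m1 1)
    (hh : cntP g2 0 (pyIdx m1 0) ≠ 0) (ha : cntP g2 1 (pyIdx m1 1) ≠ 0) :
    ((seg1 m1 g2).findIdx (· == pyIdx m1 0) < (seg1 m1 g2).findIdx (· == pyIdx m1 1)
      ↔ fidx g2 0 (pyIdx m1 0) ≤ fidx g2 1 (pyIdx m1 1)) := by
  induction g2 with
  | nil => simp [cntP] at hh
  | cons m2 rest ih =>
    rw [seg1, List.flatMap_cons, ← seg1, segM]
    have ehA : (pyIdx m1 0 == pyIdx m1 1) = false := by simp [hne]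
    have eaH : (pyIdx m1 1 == pyIdx m1 0) = false := by simp [Ne.symm hne]
    by_cases h1 : pyIdx m1 0 = pyIdx m2 0 <;> by_cases h2 : pyIdx m1 1 = pyIdx m2 1
    · -- both match here: h at 0, a at 1; fidx both 0
      rw [if_pos h1, if_pos h2]
      have b1 : (pyIdx m2 0 == pyIdx m1 0) = true := by simp [← h1]
      have b2 : (pyIdx m2 1 == pyIdx m1 1) = true := by simp [← h2]
      simp [fidx, List.findIdx_cons, ehA, eaH, b1, b2]
    · -- only home matches: h first; fidx0 = 0
      rw [if_pos h1, if_neg h2]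
      have b1 : (pyIdx m2 0 == pyIdx m1 0) = true := by simp [← h1]
      have b2 : (pyIdx m2 1 == pyIdx m1 1) = false := by
        simp only [beq_eq_false_iff_ne, ne_eq]
        exact fun e => h2 e.symm
      simp [fidx, List.findIdx_cons, ehA, b1, b2]
    · -- only away matches: a first; fidx1 = 0, fidx0 ≥ 1
      rw [if_neg h1, if_pos h2]
      have b1 : (pyIdx m2 0 == pyIdx m1 0) = false := by
        simp only [beq_eq_false_iff_ne, ne_eq]
        exact fun e => h1 e.symm
      have b2 : (pyIdx m2 1 == pyIdx m1 1) = true := by simp [← h2]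
      simp [fidx, List.findIdx_cons, eaH, b1, b2]
    · -- neither matches here: defer to rest
      rw [if_neg h1, if_neg h2]
      have b1 : (pyIdx m2 0 == pyIdx m1 0) = false := by
        simp only [beq_eq_false_iff_ne, ne_eq]
        exact fun e => h1 e.symm
      have b2 : (pyIdx m2 1 == pyIdx m1 1) = false := by
        simp only [beq_eq_false_iff_ne, ne_eq]
        exact fun e => h2 e.symm
      have hh' : cntP rest 0 (pyIdx m1 0) ≠ 0 := by
        simpa [cntP, List.countP_cons, b1] using hh
      have ha' : cntP rest 1 (pyIdx m1 1) ≠ 0 := by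
        simpa [cntP, List.countP_cons, b2] using ha
      have := ih hh' ha'
      simp only [List.nil_append]
      rw [fidx, List.findIdx_cons, fidx, List.findIdx_cons]
      simp only [b1, b2, cond_false]
      rw [← fidx, ← fidx]
      constructor
      · intro hx
        have := this.mp hx
        omega
      · intro hx
        have := this.mpr (by omega)
        exact this

lemma cfold_eq (st : Int × PySem.Dict Int Int) (l : List Int) :
    cfold st l = (st.1 + (l.length : Int), l.foldl ins st.2) := by
  obtain ⟨b, d⟩ := st
  unfold cfold
  rw [PySem.List.foldl_prod_mk (f := fun b (_ : Int) => b + 1) (g := ins),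
    PySem.List.foldl_add (g := fun _ => (1 : Int))]
  simp

lemma seg1_nil_of_counts (m1 : List Int) (g2 : List (List Int))
    (hz0 : cntP g2 0 (pyIdx m1 0) = 0) (hz1 : cntP g2 1 (pyIdx m1 1) = 0) :
    seg1 m1 g2 = [] := by
  have := length_seg1 m1 g2
  rw [hz0, hz1] at this
  exact List.length_eq_zero_iff.mp (by omega)

lemma bStepM_eq (g2 : List (List Int)) (st : Int × PySem.Dict Int Int) (m1 : List Int)
    (hord : cntP g2 0 (pyIdx m1 0) ≠ 0 → cntP g2 1 (pyIdx m1 1) ≠ 0 →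
      fidx g2 0 (pyIdx m1 0) ≤ fidx g2 1 (pyIdx m1 1)) :
    bStepM (bIndexes g2).1 (bIndexes g2).2 st m1 = cfold st (seg1 m1 g2) := by
  obtain ⟨b0, d0⟩ := st
  rw [cfold_eq]
  simp only [bStepM, getD_bIndexes_fst, getD_bIndexes_snd]
  by_cases hz0 : cntP g2 0 (pyIdx m1 0) = 0 <;> by_cases hz1 : cntP g2 1 (pyIdx m1 1) = 0
  · -- no breaks at all
    have he : seg1 m1 g2 = [] := seg1_nil_of_counts m1 g2 hz0 hz1
    simp [he, hz0, hz1]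
  · -- only the away side
    have hlen : (seg1 m1 g2).length = cntP g2 1 (pyIdx m1 1) := by
      rw [length_seg1, hz0]; omega
    have hcH : ¬((cntP g2 0 (pyIdx m1 0) : Int) ≠ 0) := by simp [hz0]
    have hcA : ((cntP g2 1 (pyIdx m1 1) : Int) ≠ 0) := by simpa using hz1
    rw [if_neg hcH, if_pos hcA]
    by_cases hq : pyIdx m1 0 = pyIdx m1 1
    · have hall : ∀ x ∈ seg1 m1 g2, x = pyIdx m1 1 := by
        intro x hx
        rcases mem_seg1 m1 g2 x hx with hh | hh
        · rw [hh, hq]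
        · exact hh
      have hnemp : seg1 m1 g2 ≠ [] := by
        intro he
        rw [he] at hlen
        simp at hlen
        omega
      rw [fold_ins_one _ _ _ hall hnemp, hlen]
    · rw [fold_ins_two _ _ _ _ hq (mem_seg1 m1 g2),
        count_seg1_home _ _ hq, count_seg1_away _ _ hq,
        if_pos hz0, if_neg hz1, hlen]
  · -- only the home side
    have hlen : (seg1 m1 g2).length = cntP g2 0 (pyIdx m1 0) := by
      rw [length_seg1, hz1]; omega
    have hcH : ((cntP g2 0 (pyIdx m1 0) : Int) ≠ 0) := by simpa using hz0
    have hcA : ¬((cntP g2 1 (pyIdx m1 1) : Int) ≠ 0) := by simp [hz1]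
    rw [if_pos hcH, if_neg hcA]
    by_cases hq : pyIdx m1 0 = pyIdx m1 1
    · have hall : ∀ x ∈ seg1 m1 g2, x = pyIdx m1 0 := by
        intro x hx
        rcases mem_seg1 m1 g2 x hx with hh | hh
        · exact hh
        · rw [hh, ← hq]
      have hnemp : seg1 m1 g2 ≠ [] := by
        intro he
        rw [he] at hlen
        simp at hlen
        omega
      rw [fold_ins_one _ _ _ hall hnemp, hlen]
    · rw [fold_ins_two _ _ _ _ hq (mem_seg1 m1 g2),
        count_seg1_home _ _ hq, count_seg1_away _ _ hq,
        if_neg hz0, if_pos hz1, hlen]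
  · -- both sides break
    have hcH : ((cntP g2 0 (pyIdx m1 0) : Int) ≠ 0) := by simpa using hz0
    have hcA : ((cntP g2 1 (pyIdx m1 1) : Int) ≠ 0) := by simpa using hz1
    rw [if_pos hcH]
    rw [if_pos hcA]
    by_cases hq : pyIdx m1 0 = pyIdx m1 1
    · have hall : ∀ x ∈ seg1 m1 g2, x = pyIdx m1 0 := by
        intro x hx
        rcases mem_seg1 m1 g2 x hx with hh | hh
        · exact hh
        · rw [hh, ← hq]
      have hnemp : seg1 m1 g2 ≠ [] := by
        intro he
        have hl := length_seg1 m1 g2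
        rw [he] at hl
        simp only [List.length_nil] at hl
        omega
      rw [fold_ins_one _ _ _ hall hnemp, length_seg1]
      rw [show pyIdx m1 1 = pyIdx m1 0 from hq.symm, credit_credit_same]
      refine Prod.ext ?_ ?_
      · dsimp only; push_cast; try ring
      · dsimp only
        congr 1
    · have hfi : fidx g2 0 (pyIdx m1 0) ≤ fidx g2 1 (pyIdx m1 1) := hord hz0 hz1
      rw [fold_ins_two _ _ _ _ hq (mem_seg1 m1 g2),
        count_seg1_home _ _ hq, count_seg1_away _ _ hq,
        if_neg hz0, if_neg hz1, length_seg1,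
        if_pos ((first_seg1 m1 g2 hq hz0 hz1).mpr hfi)]
      refine Prod.ext ?_ ?_
      · dsimp only; push_cast; ring
      · rfl

lemma cfold_append (st : Int × PySem.Dict Int Int) (l1 l2 : List Int) :
    cfold st (l1 ++ l2) = cfold (cfold st l1) l2 := by
  unfold cfold
  rw [List.foldl_append]

lemma foldl_cfold {α : Type} (f : α → List Int) (l : List α) (st : Int × PySem.Dict Int Int) :
    l.foldl (fun st x => cfold st (f x)) st = cfold st (l.flatMap f) := by
  induction l generalizing st with
  | nil => rfl
  | cons x xs ih => rw [List.foldl_cons, ih, List.flatMap_cons, cfold_append]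

lemma loopB_eq (st : Int × PySem.Dict Int Int) (g : List (List Int) × List (List Int))
    (hord : ∀ m1 ∈ g.1, cntP g.2 0 (pyIdx m1 0) ≠ 0 → cntP g.2 1 (pyIdx m1 1) ≠ 0 →
      fidx g.2 0 (pyIdx m1 0) ≤ fidx g.2 1 (pyIdx m1 1)) :
    loopB st g = cfold st (segG g) := by
  unfold loopB
  have h1 := PySem.List.foldl_congr_mem (l := g.1) (init := st)
    (f := bStepM (bIndexes g.2).1 (bIndexes g.2).2)
    (g := fun st m1 => cfold st (seg1 m1 g.2))
    (by intro acc x hx; exact bStepM_eq g.2 acc x (hord x hx))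
  rw [h1, foldl_cfold]
  rfl

lemma B_phase1 (campionato : List (List (List Int)))
    (hord : ∀ p ∈ campionato.zip (campionato.drop 1), ∀ m1 ∈ p.1,
      cntP p.2 0 (pyIdx m1 0) ≠ 0 → cntP p.2 1 (pyIdx m1 1) ≠ 0 →
      fidx p.2 0 (pyIdx m1 0) ≤ fidx p.2 1 (pyIdx m1 1)) :
    (campionato.zip (campionato.drop 1)).foldl loopB (0, PySem.Dict.empty)
      = (((SQ campionato).length : Int), PySem.Dict.counter (SQ campionato)) := by
  have h1 := PySem.List.foldl_congr_mem (l := campionato.zip (campionato.drop 1))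
    (init := ((0 : Int), (PySem.Dict.empty : PySem.Dict Int Int))) (f := loopB)
    (g := fun st g => cfold st (segG g))
    (by intro acc x hx; exact loopB_eq acc x (hord x hx))
  rw [h1, foldl_cfold, cfold_eq, ← SQ]
  refine Prod.ext ?_ ?_
  · dsimp only; omega
  · show (SQ campionato).foldl ins PySem.Dict.empty = _
    exact PySem.Dict.foldl_insert_getD_add_one_eq_counter (SQ campionato)

lemma dedup_go (cnt : Int → Int) (rest : List Int) (S : PySem.Set Int) :
    rest.foldl (fun acc sr => if acc.contains [sr, cnt sr] then acc else acc ++ [[sr, cnt sr]])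
      (S.map (fun t => [t, cnt t]))
    = (PySem.Set.update S rest).map (fun t => [t, cnt t]) := by
  induction rest generalizing S with
  | nil => rfl
  | cons sr rest ih =>
    rw [List.foldl_cons]
    have hupd : PySem.Set.update S (sr :: rest) = PySem.Set.update (PySem.Set.add S sr) rest := rfl
    rw [hupd]
    by_cases hs : sr ∈ S
    · have hcontains : (S.map (fun t => [t, cnt t])).contains [sr, cnt sr] = true := by
        simp only [List.contains_eq_mem, decide_eq_true_eq]
        exact List.mem_map_of_mem hs
      rw [if_pos hcontains]
      have hadd : PySem.Set.add S sr = S := by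
        simp [PySem.Set.add, PySem.Set.contains, hs]
      rw [hadd]
      exact ih S
    · have hcontains : (S.map (fun t => [t, cnt t])).contains [sr, cnt sr] = false := by
        simp only [List.contains_eq_mem, decide_eq_false_iff_not]
        intro hm
        rw [List.mem_map] at hm
        obtain ⟨t, ht, he⟩ := hm
        injection he with h1 _
        exact hs (h1 ▸ ht)
      rw [if_neg (by rw [hcontains]; simp)]
      have hadd : PySem.Set.add S sr = S ++ [sr] := by
        simp [PySem.Set.add, PySem.Set.contains, hs]
      have hmap : S.map (fun t => [t, cnt t]) ++ [[sr, cnt sr]]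
          = (PySem.Set.add S sr).map (fun t => [t, cnt t]) := by
        rw [hadd, List.map_append]
        rfl
      rw [hmap]
      exact ih _

lemma dedup_loop (sq : List Int) :
    sq.foldl (fun acc sr =>
        if acc.contains [sr, (sq.count sr : Int)] then acc
        else acc ++ [[sr, (sq.count sr : Int)]]) ([] : List (List Int))
      = (PySem.Dict.counter sq).items.map (fun p => [p.1, p.2]) := by
  have h0 := dedup_go (fun t => (sq.count t : Int)) sq []
  simp only [List.map_nil] at h0
  rw [h0, PySem.Dict.items_counter, List.map_map]
  have : PySem.Set.update [] sq = PySem.Set.ofList sq := by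
    rw [PySem.Set.ofList_eq_foldl]
    rfl
  rw [this]
  rfl

-- bridging Pre_'s accessors (m.getD) with the ports' pyIdx on matches of length ≥ 2
lemma pyIdx_eq_mGet (m : List Int) (hm : 2 ≤ m.length) :
    pyIdx m 0 = mGet m 0 ∧ pyIdx m 1 = mGet m 1 := by
  match m, hm with
  | a :: b :: rest, _ =>
    have h0 : PySem.List.pyGet? (a :: b :: rest) ((0 : Nat) : Int) = some a := by
      rw [PySem.List.pyGet?_natCast]; rfl
    have h1 : PySem.List.pyGet? (a :: b :: rest) ((1 : Nat) : Int) = some b := by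
      rw [PySem.List.pyGet?_natCast]; rfl
    constructor
    · show (PySem.List.pyGet? (a :: b :: rest) 0).getD 0 = mGet (a :: b :: rest) 0
      rw [show (0 : Int) = ((0 : Nat) : Int) from rfl, h0]; rfl
    · show (PySem.List.pyGet? (a :: b :: rest) 1).getD 0 = mGet (a :: b :: rest) 1
      rw [show (1 : Int) = ((1 : Nat) : Int) from rfl, h1]; rfl

lemma findIdx_congr_mem {α : Type} (p q : α → Bool) (l : List α)
    (h : ∀ x ∈ l, p x = q x) : l.findIdx p = l.findIdx q := by
  induction l with
  | nil => rfl
  | cons x xs ih =>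
    rw [List.findIdx_cons, List.findIdx_cons, h x List.mem_cons_self,
      ih (fun y hy => h y (List.mem_cons_of_mem _ hy))]

lemma zip_nil_of_short (c : List (List (List Int))) (hc : c.length ≤ 1) :
    c.zip (c.drop 1) = [] := by
  match c, hc with
  | [], _ => rfl
  | [g], _ => rfl

-- ===== VERDICT (by name: the statement is the Claim_ definition above) =====
theorem conta_breaks_spec : Claim_equal_conta_breaks := by
  intro campionato _ hPre
  obtain ⟨hlen, hord0⟩ := hPre
  have hord : ∀ p ∈ campionato.zip (campionato.drop 1), ∀ m1 ∈ p.1,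
      cntP p.2 0 (pyIdx m1 0) ≠ 0 → cntP p.2 1 (pyIdx m1 1) ≠ 0 →
      fidx p.2 0 (pyIdx m1 0) ≤ fidx p.2 1 (pyIdx m1 1) := by
    rcases hlen with hle | hall
    · intro p hp
      rw [zip_nil_of_short campionato hle] at hp
      simp at hp
    · intro p hp m1 hm1
      have hmem := List.of_mem_zip hp
      have hg1 : p.1 ∈ campionato := hmem.1
      have hg2 : p.2 ∈ campionato := List.mem_of_mem_drop hmem.2
      have hm1len : 2 ≤ m1.length := hall p.1 hg1 m1 hm1
      have hpy1 := pyIdx_eq_mGet m1 hm1len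
      have hcnt0 : cntP p.2 0 (pyIdx m1 0) = preCnt p.2 0 (mGet m1 0) := by
        rw [hpy1.1]
        exact List.countP_congr (fun m hm => by
          rw [(pyIdx_eq_mGet m (hall p.2 hg2 m hm)).1])
      have hcnt1 : cntP p.2 1 (pyIdx m1 1) = preCnt p.2 1 (mGet m1 1) := by
        rw [hpy1.2]
        exact List.countP_congr (fun m hm => by
          rw [(pyIdx_eq_mGet m (hall p.2 hg2 m hm)).2])
      have hfi0 : fidx p.2 0 (pyIdx m1 0) = preIdx p.2 0 (mGet m1 0) := by
        rw [hpy1.1]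
        exact findIdx_congr_mem _ _ _ (fun m hm => by
          rw [(pyIdx_eq_mGet m (hall p.2 hg2 m hm)).1])
      have hfi1 : fidx p.2 1 (pyIdx m1 1) = preIdx p.2 1 (mGet m1 1) := by
        rw [hpy1.2]
        exact findIdx_congr_mem _ _ _ (fun m hm => by
          rw [(pyIdx_eq_mGet m (hall p.2 hg2 m hm)).2])
      rw [hcnt0, hcnt1, hfi0, hfi1]
      exact hord0 p hp m1 hm1
  unfold Spec_conta_breaks conta_breaks conta_breaks_alt
  simp only [A_phase1, B_phase1 campionato hord, dedup_loop]
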